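-- pv_equiv track=rewrite | github.com/algo-gogo/algo_study | 프로그래머스/기출문제/월간코드챌린지1/풍선터뜨리기.py | solution
-- ===== SOURCE A (Python) =====
-- def solution(a):
--     if len(a) == 1:
--         return 1
--     if len(a) == 2:
--         return 2
--
--     left = a[0]
--     right = a[-1]
--
--     left_list = []
--     right_list = []
--     for i in a:
--         if i < left:
--             left_list.append(i)
--             left = i
--
--     for i in a[::-1]:
--         if i < right:
--             right_list.append(i)
--             right = i
--
--     left_list.append(a[0])
--     right_list.append(a[-1])
--     s = left_list + right_list
--     s = list(set(s))
--
--     return len(s)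
-- ===== SOURCE B (Python) =====
-- def solution(a):
--     if len(a) == 1:
--         return 1
--     if len(a) == 2:
--         return 2
--     first = {}
--     last = {}
--     for i, v in enumerate(a):
--         if v not in first:
--             first[v] = i
--         last[v] = i
--     count = 0
--     lo = len(a)
--     hi = -1
--     for v in sorted(first):
--         if first[v] < lo or last[v] > hi:
--             count += 1
--         lo = min(lo, first[v])
--         hi = max(hi, last[v])
--     return count
-- ===== Notes on version B (the rewrite author's own statement) =====
-- stated objective: alternative
-- what changed: B replaces A's two running-minimum record passes by a value-indexed approach: one pass records each distinct value's first and last occurrence index in dicts, then the distinct values are scanned in ascending sorted order, counting a value when its first occurrence precedes every strictly smaller element or its last occurrence follows every strictly smaller element.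
import Mathlib
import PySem

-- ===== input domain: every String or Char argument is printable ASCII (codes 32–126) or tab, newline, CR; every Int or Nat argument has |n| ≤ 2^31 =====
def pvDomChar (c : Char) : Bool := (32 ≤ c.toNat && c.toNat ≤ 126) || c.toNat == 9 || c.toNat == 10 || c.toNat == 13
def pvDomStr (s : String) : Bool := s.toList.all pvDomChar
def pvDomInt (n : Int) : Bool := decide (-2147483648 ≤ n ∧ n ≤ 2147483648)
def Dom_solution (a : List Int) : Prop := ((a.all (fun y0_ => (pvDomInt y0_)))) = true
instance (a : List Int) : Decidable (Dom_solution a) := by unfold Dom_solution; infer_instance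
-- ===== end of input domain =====

-- B indexes each distinct value's first/last occurrence and scans the distinct values in
-- ascending sorted order, instead of A's two running-minimum record passes (objective: alternative).

-- ===== PORT A =====
-- A's loop "for i in a: if i < left: left_list.append(i); left = i", emitted in append order
def recordMins : List Int → Int → List Int
  | [], _ => []
  | i :: t, left => if i < left then i :: recordMins t i else recordMins t left

def solution (a : List Int) : Int :=
  match a with
  | [] => 0  -- unreachable under Pre_solution (Python raises IndexError reading the first element)
  | a0 :: t =>
    if (a0 :: t).length = 1 then 1
    else if (a0 :: t).length = 2 then 2
    else
      let an := t.getLastD a0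
      let leftList := recordMins (a0 :: t) a0
      let rightList := recordMins (a0 :: t).reverse an
      ((PySem.Set.ofList ((leftList ++ [a0]) ++ (rightList ++ [an]))).length : Int)

-- ===== PORT B =====
-- Source B's first loop: "for i, v in enumerate(a): if v not in first: first[v] = i; last[v] = i"
def flStep (p : PySem.Dict Int Int × PySem.Dict Int Int) (iv : Int × Int) :
    PySem.Dict Int Int × PySem.Dict Int Int :=
  ((if p.1.contains iv.2 then p.1 else p.1.insert iv.2 iv.1), p.2.insert iv.2 iv.1)

-- Source B's second loop body, over sorted(first); the state is (count, lo, hi);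
-- Python's first[v]/last[v] are ported as getD with default 0 (v is a key, so the default is never read)
def cntStep (fst lst : PySem.Dict Int Int) (s : Int × Int × Int) (v : Int) : Int × Int × Int :=
  ((if fst.getD v 0 < s.2.1 ∨ lst.getD v 0 > s.2.2 then s.1 + 1 else s.1),
   min s.2.1 (fst.getD v 0), max s.2.2 (lst.getD v 0))

def solution_alt (a : List Int) : Int :=
  if a.length = 1 then 1
  else if a.length = 2 then 2
  else
    let fl := (PySem.List.enumerate a 0).foldl flStep (PySem.Dict.empty, PySem.Dict.empty)
    let ks := PySem.List.sorted fl.1.keys (fun x => x) false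
    let r := ks.foldl (cntStep fl.1 fl.2) (0, (a.length : Int), -1)
    r.1

-- ===== PRECONDITION & SPEC =====
-- Python A reads the first element of an empty list and raises IndexError; Pre_ excludes only the empty list.
def Pre_solution (a : List Int) : Prop := a ≠ []
instance (a : List Int) : Decidable (Pre_solution a) := by unfold Pre_solution; infer_instance
def pvWitness_solution : List Int := [26, 83, 0, 50, 34]

def Spec_solution (a : List Int) (out : Int) : Prop := out = solution_alt a
instance (a : List Int) (out : Int) : Decidable (Spec_solution a out) := by unfold Spec_solution; infer_instance

-- ===== CLAIM (what is proved, stated in full; the proofs are below) =====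
def Claim_equal_solution : Prop := ∀ (a : List Int), Dom_solution a → Pre_solution a → Spec_solution a (solution a)

-- ===== LEMMAS AND PROOFS =====

-- A's running-minimum values (neither port computes these; they only name A's semantics)
def runningMins : List Int → Int → List Int
  | [], _ => []
  | x :: t, m => (min m x) :: runningMins t (min m x)

-- "some occurrence of y has only elements ≥ y before it"
def Scond (l : List Int) (y : Int) : Prop := ∃ p q, l = p ++ y :: q ∧ ∀ x ∈ p, y ≤ x

-- B's per-value test, on a generic list (used for a and a.reverse)
def Test (l : List Int) (v : Int) : Bool :=
  l.findIdx (fun w => w == v) < l.findIdx (fun w => decide (w < v))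

theorem test_iff (l : List Int) (v : Int) :
    Test l v = true ↔ l.findIdx (fun w => w == v) < l.findIdx (fun w => decide (w < v)) := by
  simp [Test]

-- generic findIdx toolbox
theorem findIdx_congr {α : Type} (l : List α) (p q : α → Bool)
    (h : ∀ x ∈ l, p x = q x) : l.findIdx p = l.findIdx q := by
  induction l with
  | nil => rfl
  | cons x t ih =>
    have hx := h x (by simp)
    simp only [List.findIdx_cons, hx, ih (fun y hy => h y (by simp [hy]))]

theorem findIdx_or {α : Type} (l : List α) (p q : α → Bool) :
    l.findIdx (fun x => p x || q x) = min (l.findIdx p) (l.findIdx q) := by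
  induction l with
  | nil => rfl
  | cons x t ih =>
    simp only [List.findIdx_cons, ih]
    cases hp : p x <;> cases hq : q x <;> simp

theorem findIdx_append_left {α : Type} (l1 l2 : List α) (p : α → Bool)
    (h : l1.findIdx p < l1.length) : (l1 ++ l2).findIdx p = l1.findIdx p := by
  induction l1 with
  | nil => simp at h
  | cons x t ih =>
    simp only [List.cons_append, List.findIdx_cons] at *
    cases hp : p x
    · simp only [hp, cond_false] at h ⊢
      have h' : t.findIdx p < t.length := by simp only [List.length_cons] at h; omega
      rw [ih h']
    · simp [hp]

theorem findIdx_append_right {α : Type} (l1 l2 : List α) (p : α → Bool)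
    (h : ∀ x ∈ l1, p x = false) : (l1 ++ l2).findIdx p = l1.length + l2.findIdx p := by
  induction l1 with
  | nil => simp
  | cons x t ih =>
    have hx := h x (by simp)
    simp only [List.cons_append, List.findIdx_cons, hx, cond_false, List.length_cons]
    rw [ih (fun y hy => h y (by simp [hy]))]
    omega

theorem findIdx_eq_length_of_forall_false {α : Type} (l : List α) (p : α → Bool)
    (h : ∀ x ∈ l, p x = false) : l.findIdx p = l.length := by
  induction l with
  | nil => rfl
  | cons x t ih =>
    have hx := h x (by simp)
    simp only [List.findIdx_cons, hx, cond_false, List.length_cons,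
      ih (fun y hy => h y (by simp [hy]))]

-- the strict-decrease records together with the start value have exactly the
-- values of the running-minimum sequence together with the start value
theorem mem_recordMins_iff (l : List Int) (v y : Int) :
    (y ∈ recordMins l v ∨ y = v) ↔ (y ∈ runningMins l v ∨ y = v) := by
  induction l generalizing v with
  | nil => simp [recordMins, runningMins]
  | cons x t ih =>
    by_cases h : x < v
    · have hmin : min v x = x := by omega
      simp only [recordMins, runningMins, if_pos h, hmin, List.mem_cons]
      have hx := ih x
      tauto
    · have hmin : min v x = v := by omega
      simp only [recordMins, runningMins, if_neg h, hmin, List.mem_cons]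
      have hv := ih v
      tauto

-- head form: when the scanned list starts with the start value
theorem mem_record_head (l : List Int) (v y : Int) :
    y ∈ recordMins (v :: l) v ++ [v] ↔ y ∈ runningMins (v :: l) v := by
  have h1 : recordMins (v :: l) v = recordMins l v := by
    simp [recordMins]
  have h2 : runningMins (v :: l) v = v :: runningMins l v := by
    simp [runningMins]
  rw [h1, h2]
  have h3 := mem_recordMins_iff l v y
  simp only [List.mem_append, List.mem_cons, List.not_mem_nil, or_false] at h3 ⊢
  tauto

-- running minima are exactly the values with an occurrence preceded only by ≥ elements
theorem mem_runningMins_iff (l : List Int) (m y : Int) :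
    y ∈ runningMins l m ↔
      ((∃ p q, l = p ++ y :: q ∧ y ≤ m ∧ ∀ x ∈ p, y ≤ x) ∨
       (y = m ∧ ∃ x, l.head? = some x ∧ m ≤ x)) := by
  induction l generalizing m with
  | nil => simp [runningMins]
  | cons x t ih =>
    simp only [runningMins, List.mem_cons, ih (min m x), List.head?_cons]
    constructor
    · have hhead : y = min m x →
          ((∃ p q, x :: t = p ++ y :: q ∧ y ≤ m ∧ ∀ z ∈ p, y ≤ z) ∨
           (y = m ∧ ∃ z, some x = some z ∧ m ≤ z)) := by
        intro rfl'
        by_cases hmx : m ≤ x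
        · right; exact ⟨by omega, x, rfl, by omega⟩
        · left; exact ⟨[], t, by rw [rfl']; simp [show min m x = x by omega], by omega, by simp⟩
      rintro (h | ⟨p, q, rfl, hle, hp⟩ | ⟨h, z, hz, hzle⟩)
      · exact hhead h
      · left
        exact ⟨x :: p, q, by simp, by omega, by
          intro z hz; rcases List.mem_cons.mp hz with rfl | hz
          · omega
          · exact hp z hz⟩
      · exact hhead h
    · rintro (⟨p, q, heq, hle, hp⟩ | ⟨rfl, z, hz, hzle⟩)
      · rcases p with _ | ⟨p0, p'⟩
        · simp only [List.nil_append, List.cons.injEq] at heq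
          left; omega
        · simp only [List.cons_append, List.cons.injEq] at heq
          obtain ⟨rfl, heq2⟩ := heq
          have hy : y ≤ x := hp x (by simp)
          right; left
          exact ⟨p', q, heq2, by omega, fun w hw => hp w (by simp [hw])⟩
      · simp only [Option.some.injEq] at hz
        subst hz
        left
        omega

theorem mem_runningMins_head (t : List Int) (a0 y : Int) :
    y ∈ runningMins (a0 :: t) a0 ↔ Scond (a0 :: t) y := by
  rw [mem_runningMins_iff]
  constructor
  · rintro (⟨p, q, heq, _, hp⟩ | ⟨rfl, z, hz, hzle⟩)
    · exact ⟨p, q, heq, hp⟩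
    · simp only [List.head?_cons, Option.some.injEq] at hz
      subst hz
      exact ⟨[], t, rfl, by simp⟩
  · rintro ⟨p, q, heq, hp⟩
    left
    refine ⟨p, q, heq, ?_, hp⟩
    rcases p with _ | ⟨p0, p'⟩
    · simp only [List.nil_append, List.cons.injEq] at heq; omega
    · simp only [List.cons_append, List.cons.injEq] at heq
      obtain ⟨rfl, heq2⟩ := heq
      have := hp a0 (by simp)
      omega

-- Scond ↔ first occurrence before the first strictly smaller element
theorem scond_iff_test (l : List Int) (v : Int) :
    Scond l v ↔ (v ∈ l ∧ Test l v = true) := by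
  induction l with
  | nil => simp [Scond]
  | cons x t ih =>
    by_cases hxv : x = v
    · subst hxv
      constructor
      · intro _
        refine ⟨by simp, ?_⟩
        rw [test_iff]
        simp only [List.findIdx_cons, beq_self_eq_true, cond_true]
        have hd : decide (x < x) = false := by simp
        simp [hd]
      · intro _
        exact ⟨[], t, rfl, by simp⟩
    · have hx : (x == v) = false := by simp [hxv]
      by_cases hlt : x < v
      · have hd : decide (x < v) = true := by simp [hlt]
        constructor
        · rintro ⟨p, q, heq, hp⟩
          exfalso
          rcases p with _ | ⟨p0, p'⟩
          · simp only [List.nil_append, List.cons.injEq] at heq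
            obtain ⟨h1, _⟩ := heq
            omega
          · simp only [List.cons_append, List.cons.injEq] at heq
            obtain ⟨rfl, _⟩ := heq
            have := hp x (by simp)
            omega
        · rintro ⟨hmem, htest⟩
          exfalso
          rw [test_iff] at htest
          simp only [List.findIdx_cons, hx, hd, cond_false, cond_true] at htest
          omega
      · have hd : decide (x < v) = false := by simp; omega
        constructor
        · rintro ⟨p, q, heq, hp⟩
          rcases p with _ | ⟨p0, p'⟩
          · exfalso
            simp only [List.nil_append, List.cons.injEq] at heq
            obtain ⟨h1, _⟩ := heq
            omega
          · simp only [List.cons_append, List.cons.injEq] at heq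
            obtain ⟨rfl, heq2⟩ := heq
            have hT := ih.mp ⟨p', q, heq2, fun z hz => hp z (by simp [hz])⟩
            refine ⟨by simp [hT.1], ?_⟩
            rw [test_iff]
            simp only [List.findIdx_cons, hx, hd, cond_false]
            have h2 := (test_iff _ _).mp hT.2
            omega
        · rintro ⟨hmem, htest⟩
          have hmt : v ∈ t := by
            rcases List.mem_cons.mp hmem with rfl | h
            · exact absurd rfl hxv
            · exact h
          rw [test_iff] at htest
          simp only [List.findIdx_cons, hx, hd, cond_false] at htest
          have hT := ih.mpr ⟨hmt, by rw [test_iff]; omega⟩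
          obtain ⟨p, q, heq, hp⟩ := hT
          exact ⟨x :: p, q, by simp [heq], by
            intro z hz; rcases List.mem_cons.mp hz with rfl | hz
            · omega
            · exact hp z hz⟩

-- the first/last dicts built by Source B's first loop, characterised by get?
theorem flFold_get (l : List Int) (s : Int) (d1 d2 : PySem.Dict Int Int) (v : Int) :
    (((PySem.List.enumerate l s).foldl flStep (d1, d2)).1.get? v =
       (if d1.contains v then d1.get? v
        else if v ∈ l then some (s + (l.findIdx (fun w => w == v) : Int)) else none))
    ∧ (((PySem.List.enumerate l s).foldl flStep (d1, d2)).2.get? v =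
       (if v ∈ l then some (s + (l.length : Int) - 1 - (l.reverse.findIdx (fun w => w == v) : Int))
        else d2.get? v)) := by
  induction l generalizing s d1 d2 with
  | nil =>
    refine ⟨?_, by simp [PySem.List.enumerate]⟩
    simp only [PySem.List.enumerate, List.foldl_nil, List.not_mem_nil, if_false]
    by_cases hc : d1.contains v
    · simp [hc]
    · simp only [hc, Bool.false_eq_true, if_false]
      rw [PySem.Dict.get?_eq_none_iff_not_mem_keys]
      intro hm
      exact hc ((PySem.Dict.contains_iff_mem_keys _ _).mpr hm)
  | cons x t ih =>
    rw [PySem.List.enumerate_cons]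
    simp only [List.foldl_cons]
    have hstep : flStep (d1, d2) (s, x) =
        ((if d1.contains x then d1 else d1.insert x s), d2.insert x s) := rfl
    rw [hstep]
    obtain ⟨ih1, ih2⟩ := ih (s + 1) (if d1.contains x then d1 else d1.insert x s) (d2.insert x s)
    constructor
    · rw [ih1]
      by_cases hxv : x = v
      · subst hxv
        by_cases hc : d1.contains x
        · simp [hc]
        · have hc' : (d1.insert x s).contains x = true := PySem.Dict.contains_insert_self _ _ _
          simp only [hc, if_false, if_true, hc', PySem.Dict.get?_insert_self]
          have : (x :: t).findIdx (fun w => w == x) = 0 := by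
            simp [List.findIdx_cons]
          simp [this, hc]
      · have hxvb : (x == v) = false := by simp [hxv]
        have hfi : ((x :: t).findIdx (fun w => w == v) : Int) = (t.findIdx (fun w => w == v) : Int) + 1 := by
          simp [List.findIdx_cons, hxvb]
        have hvx : v ≠ x := fun hh => hxv hh.symm
        have hvxb : (v == x) = false := by simp [hvx]
        by_cases hc : d1.contains v
        · have hcx : (if d1.contains x then d1 else d1.insert x s).contains v = true := by
            by_cases h : d1.contains x <;> simp [h, PySem.Dict.contains_insert, hc]
          rw [if_pos hcx, if_pos hc]
          by_cases h : d1.contains x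
          · simp [h]
          · simp only [h, if_false]
            exact PySem.Dict.get?_insert_of_ne d1 s hvx
        · have hc' : d1.contains v = false := by simpa using hc
          have hcx : (if d1.contains x then d1 else d1.insert x s).contains v = false := by
            by_cases h : d1.contains x <;> simp [h, PySem.Dict.contains_insert, hc', hvxb]
          simp only [hcx, hc', Bool.false_eq_true, if_false]
          by_cases hm : v ∈ t
          · rw [if_pos hm, if_pos (by simp [hm]), hfi]
            congr 1
            omega
          · have hnm : v ∉ x :: t := by
              intro hh
              rcases List.mem_cons.mp hh with rfl | hh2
              exacts [hxv rfl, hm hh2]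
            rw [if_neg hm, if_neg hnm]
    · rw [ih2]
      by_cases hm : v ∈ t
      · rw [if_pos hm, if_pos (by simp [hm])]
        have hvr : v ∈ t.reverse := by simpa using hm
        have hlt : t.reverse.findIdx (fun w => w == v) < t.reverse.length := by
          apply List.findIdx_lt_length_of_exists
          exact ⟨v, hvr, by simp⟩
        have hrev : (x :: t).reverse = t.reverse ++ [x] := by simp
        have : (x :: t).reverse.findIdx (fun w => w == v) = t.reverse.findIdx (fun w => w == v) := by
          rw [hrev]
          exact findIdx_append_left _ _ _ hlt
        rw [this]
        simp only [List.length_cons, List.length_reverse] at *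
        congr 1
        push_cast
        omega
      · by_cases hxv : x = v
        · subst hxv
          rw [if_neg hm, if_pos (by simp : x ∈ x :: t), PySem.Dict.get?_insert_self]
          have hx' : ∀ w ∈ t.reverse, (fun w => w == x) w = false := by
            intro w hw
            simp only [List.mem_reverse] at hw
            simp
            intro h; subst h; exact hm hw
          have : (x :: t).reverse.findIdx (fun w => w == x) = t.reverse.length + [x].findIdx (fun w => w == x) := by
            rw [show (x :: t).reverse = t.reverse ++ [x] by simp]
            exact findIdx_append_right _ _ _ hx'
          rw [this]
          simp only [List.findIdx_cons, beq_self_eq_true, cond_true, List.length_reverse,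
            List.length_cons, Nat.add_zero]
          congr 1
          push_cast
          omega
        · have hnm : v ∉ x :: t := by
            intro hh
            rcases List.mem_cons.mp hh with rfl | hh2
            exacts [hxv rfl, hm hh2]
          rw [if_neg hnm, if_neg hm]
          exact PySem.Dict.get?_insert_of_ne d2 s (fun hh => hxv hh.symm)

theorem flFold_nodup (ps : List (Int × Int)) (d1 d2 : PySem.Dict Int Int)
    (h1 : d1.keys.Nodup) :
    ((ps.foldl flStep (d1, d2)).1.keys.Nodup) := by
  induction ps generalizing d1 d2 with
  | nil => exact h1
  | cons p ps ih =>
    simp only [List.foldl_cons]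
    apply ih
    by_cases h : d1.contains p.2
    · simpa [flStep, h] using h1
    · simpa [flStep, h] using PySem.Dict.nodup_keys_insert _ _ _ h1

-- the counting loop over the sorted distinct values
theorem fold_count (a : List Int) (f g : Int → Int) (vs : List Int) (c lo hi : Int)
    (hpw : vs.Pairwise (· < ·))
    (hmem : ∀ w ∈ vs, w ∈ a)
    (hall : ∀ w ∈ a, w ∈ vs ∨ ∀ v ∈ vs, w < v)
    (hf : ∀ v ∈ vs, f v = (a.findIdx (fun w => w == v) : Int))
    (hg : ∀ v ∈ vs, g v = (a.length : Int) - 1 - (a.reverse.findIdx (fun w => w == v) : Int))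
    (hlo : lo = (a.findIdx (fun w => !vs.contains w) : Int))
    (hhi : hi = (a.length : Int) - 1 - (a.reverse.findIdx (fun w => !vs.contains w) : Int)) :
    (vs.foldl (fun s v => ((if f v < s.2.1 ∨ g v > s.2.2 then s.1 + 1 else s.1),
        min s.2.1 (f v), max s.2.2 (g v))) (c, lo, hi)).1 =
      c + ((vs.filter (fun v => Test a v || Test a.reverse v)).length : Int) := by
  induction vs generalizing c lo hi with
  | nil => simp
  | cons v vs' ih =>
    have hv : v ∈ a := hmem v (by simp)
    have hvlt : ∀ w ∈ vs', v < w := (List.pairwise_cons.mp hpw).1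
    have hpw' : vs'.Pairwise (· < ·) := (List.pairwise_cons.mp hpw).2
    have hmem' : ∀ w ∈ vs', w ∈ a := fun w hw => hmem w (by simp [hw])
    have hall' : ∀ w ∈ a, w ∈ vs' ∨ ∀ u ∈ vs', w < u := by
      intro w hw
      rcases hall w hw with h | h
      · rcases List.mem_cons.mp h with rfl | h2
        · right; exact hvlt
        · left; exact h2
      · right; exact fun u hu => h u (by simp [hu])
    -- the entry lo/hi are the strictly-smaller-element bounds for the head v
    have hcongr1 : ∀ x ∈ a, (!(v :: vs').contains x) = decide (x < v) := by
      intro x hx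
      by_cases hm : x ∈ v :: vs'
      · have : ¬ x < v := by
          rcases List.mem_cons.mp hm with rfl | h2
          · omega
          · have := hvlt x h2; omega
        simp [hm, this]
      · have hlt : ∀ u ∈ v :: vs', x < u := (hall x hx).resolve_left hm
        have : x < v := hlt v (by simp)
        simp [hm, this]
    have hlo' : lo = (a.findIdx (fun w => decide (w < v)) : Int) := by
      rw [hlo, findIdx_congr a _ _ hcongr1]
    have hhi' : hi = (a.length : Int) - 1 - (a.reverse.findIdx (fun w => decide (w < v)) : Int) := by
      rw [hhi, findIdx_congr a.reverse _ _ (fun x hx => hcongr1 x (List.mem_reverse.mp hx))]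
    -- head test reduces to Test
    have htest : (f v < lo ∨ g v > hi) ↔ (Test a v || Test a.reverse v) = true := by
      rw [hf v (by simp), hg v (by simp), hlo', hhi']
      simp only [Bool.or_eq_true, test_iff]
      constructor
      · rintro (h | h)
        · left; exact_mod_cast h
        · right
          have : ((a.reverse.findIdx (fun w => w == v) : Int)) < ((a.reverse.findIdx (fun w => decide (w < v)) : Int)) := by omega
          exact_mod_cast this
      · rintro (h | h)
        · left; exact_mod_cast (Int.ofNat_lt.mpr h)
        · right
          have : ((a.reverse.findIdx (fun w => w == v) : Int)) < ((a.reverse.findIdx (fun w => decide (w < v)) : Int)) := by exact_mod_cast h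
          omega
    -- the updated bounds are those for vs'
    have hcongr2 : ∀ x ∈ a, (decide (x < v) || x == v) = (!vs'.contains x) := by
      intro x hx
      by_cases hm : x ∈ vs'
      · have hxv : v < x := hvlt x hm
        have h1 : decide (x < v) = false := by simp; omega
        have h2 : (x == v) = false := by simp; omega
        simp [hm, h1, h2]
      · by_cases hxv : x = v
        · subst hxv
          have hnv : x ∉ vs' := fun h => absurd (hvlt x h) (lt_irrefl x)
          simp [hnv]
        · have hlt : ∀ u ∈ v :: vs', x < u := by
            rcases hall x hx with h | h
            · rcases List.mem_cons.mp h with rfl | h2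
              exacts [absurd rfl hxv, absurd h2 hm]
            · exact h
          have : x < v := hlt v (by simp)
          simp [hm, this]
    have hlo2 : min lo (f v) = (a.findIdx (fun w => !vs'.contains w) : Int) := by
      rw [hlo', hf v (by simp)]
      rw [findIdx_congr a _ _ (fun x hx => (hcongr2 x hx).symm), findIdx_or]
      push_cast
      omega
    have hhi2 : max hi (g v) = (a.length : Int) - 1 - (a.reverse.findIdx (fun w => !vs'.contains w) : Int) := by
      rw [hhi', hg v (by simp)]
      rw [findIdx_congr a.reverse _ _ (fun x hx => (hcongr2 x (List.mem_reverse.mp hx)).symm), findIdx_or]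
      push_cast
      omega
    simp only [List.foldl_cons]
    rw [show (min lo (f v)) = (a.findIdx (fun w => !vs'.contains w) : Int) from hlo2,
        show (max hi (g v)) = (a.length : Int) - 1 - (a.reverse.findIdx (fun w => !vs'.contains w) : Int) from hhi2]
    rw [ih ((if (f v < lo ∨ g v > hi) then c + 1 else c)) _ _ hpw' hmem' hall'
        (fun u hu => hf u (by simp [hu])) (fun u hu => hg u (by simp [hu])) rfl rfl]
    rw [List.filter_cons]
    by_cases hc : (Test a v || Test a.reverse v) = true
    · rw [if_pos (htest.mpr hc), if_pos hc]
      simp only [List.length_cons]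
      push_cast
      omega
    · rw [if_neg (fun hh => hc (htest.mp hh)), if_neg hc]

theorem pairwise_lt_of_le_nodup (l : List Int)
    (h1 : l.Pairwise (· ≤ ·)) (h2 : l.Nodup) : l.Pairwise (· < ·) :=
  (h1.and h2).imp (fun h => lt_of_le_of_ne h.1 h.2)

-- equal membership between nodup lists gives equal length
theorem length_eq_of_nodup_of_mem_iff (L1 L2 : List Int)
    (h1 : L1.Nodup) (h2 : L2.Nodup) (h : ∀ y, y ∈ L1 ↔ y ∈ L2) :
    L1.length = L2.length := by
  refine List.Perm.length_eq ?_
  exact (List.perm_ext_iff_of_nodup h1 h2).mpr h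

theorem reverse_cons_of_ne_nil (a0 : Int) (t : List Int) (h : t ≠ []) :
    ∃ r, (a0 :: t).reverse = (t.getLastD a0) :: r := by
  rcases List.eq_nil_or_concat t with rfl | ⟨ys, x, rfl⟩
  · exact absurd rfl h
  · exact ⟨ys.reverse ++ [a0], by simp⟩

-- ===== VERDICT (by name: the statement is the Claim_ definition above) =====
theorem solution_spec : Claim_equal_solution := by
  intro a _ hpre
  unfold Spec_solution
  match a with
  | [] => exact absurd rfl hpre
  | a0 :: t =>
    by_cases h1 : (a0 :: t).length = 1
    · simp [solution, solution_alt, h1]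
    by_cases h2 : (a0 :: t).length = 2
    · simp [solution, solution_alt, h2]
    have ht : t ≠ [] := by intro h; subst h; simp at h1
    obtain ⟨r0, hr⟩ := reverse_cons_of_ne_nil a0 t ht
    simp only [solution, solution_alt, if_neg h1, if_neg h2]
    -- B side: characterise the dicts and the sorted key list
    set A := a0 :: t with hA
    set fl := (PySem.List.enumerate A 0).foldl flStep (PySem.Dict.empty, PySem.Dict.empty) with hfl
    set ks := PySem.List.sorted fl.1.keys (fun x => x) false with hks
    have hget1 : ∀ v, fl.1.get? v =
        (if v ∈ A then some (0 + (A.findIdx (fun w => w == v) : Int)) else none) := by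
      intro v
      have h := (flFold_get A 0 PySem.Dict.empty PySem.Dict.empty v).1
      rw [hfl, h, PySem.Dict.contains_empty]
      simp
    have hget2 : ∀ v, fl.2.get? v =
        (if v ∈ A then some (0 + (A.length : Int) - 1 - (A.reverse.findIdx (fun w => w == v) : Int))
         else none) := by
      intro v
      have h := (flFold_get A 0 PySem.Dict.empty PySem.Dict.empty v).2
      rw [hfl, h, PySem.Dict.get?_empty]
    have hmemkeys : ∀ v, v ∈ fl.1.keys ↔ v ∈ A := by
      intro v
      constructor
      · intro h
        by_contra hm
        have h0 := hget1 v
        rw [if_neg hm] at h0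
        exact ((PySem.Dict.get?_eq_none_iff_not_mem_keys fl.1 v).mp h0) h
      · intro h
        by_contra hk
        have h0 := (PySem.Dict.get?_eq_none_iff_not_mem_keys fl.1 v).mpr hk
        rw [hget1 v, if_pos h] at h0
        simp at h0
    have hnodk : fl.1.keys.Nodup := flFold_nodup _ _ _ PySem.Dict.nodup_keys_empty
    have hksmem : ∀ v, v ∈ ks ↔ v ∈ A := by
      intro v
      rw [hks, PySem.List.mem_sorted]
      exact hmemkeys v
    have hksnodup : ks.Nodup := ((PySem.List.sorted_perm fl.1.keys (fun x => x) false).nodup_iff).mpr hnodk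
    have hkspw : ks.Pairwise (· < ·) :=
      pairwise_lt_of_le_nodup _ (PySem.List.sorted_pairwise fl.1.keys (fun x => x)) hksnodup
    have hf : ∀ v ∈ ks, fl.1.getD v 0 = (A.findIdx (fun w => w == v) : Int) := by
      intro v hv
      rw [PySem.Dict.getD_eq_get?_getD, hget1 v, if_pos ((hksmem v).mp hv)]
      simp
    have hg : ∀ v ∈ ks, fl.2.getD v 0 = (A.length : Int) - 1 - (A.reverse.findIdx (fun w => w == v) : Int) := by
      intro v hv
      rw [PySem.Dict.getD_eq_get?_getD, hget2 v, if_pos ((hksmem v).mp hv)]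
      simp
    have hinitlo : ((A.length : Int)) = (A.findIdx (fun w => !ks.contains w) : Int) := by
      rw [findIdx_eq_length_of_forall_false A _ (by
        intro x hx
        have : x ∈ ks := (hksmem x).mpr hx
        simp [List.contains_iff_mem, this])]
    have hinithi : (-1 : Int) = (A.length : Int) - 1 - (A.reverse.findIdx (fun w => !ks.contains w) : Int) := by
      rw [findIdx_eq_length_of_forall_false A.reverse _ (by
        intro x hx
        have : x ∈ ks := (hksmem x).mpr (List.mem_reverse.mp hx)
        simp [List.contains_iff_mem, this])]
      simp
    have hfold := fold_count A (fun v => fl.1.getD v 0) (fun v => fl.2.getD v 0) ks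
      0 ((A.length : Int)) (-1) hkspw (fun w hw => (hksmem w).mp hw)
      (fun w hw => Or.inl ((hksmem w).mpr hw)) hf hg hinitlo hinithi
    have hstep : (fun (s : Int × Int × Int) (v : Int) =>
        ((if (fun v => fl.1.getD v 0) v < s.2.1 ∨ (fun v => fl.2.getD v 0) v > s.2.2 then s.1 + 1 else s.1),
         min s.2.1 ((fun v => fl.1.getD v 0) v), max s.2.2 ((fun v => fl.2.getD v 0) v))) =
        cntStep fl.1 fl.2 := by
      funext s v
      simp only [cntStep]
    clear_value fl ks
    rw [hstep] at hfold
    rw [hfold]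
    -- A side: the deduplicated record values are exactly the filtered distinct values
    have hmemL : ∀ y,
        (y ∈ (recordMins A a0 ++ [a0]) ++ (recordMins A.reverse (t.getLastD a0) ++ [t.getLastD a0])) ↔
        y ∈ ks.filter (fun v => Test A v || Test A.reverse v) := by
      intro y
      rw [List.mem_filter]
      have e1 : y ∈ recordMins A a0 ++ [a0] ↔ Scond A y := by
        rw [hA, mem_record_head, mem_runningMins_head]
      have e2 : y ∈ recordMins A.reverse (t.getLastD a0) ++ [t.getLastD a0] ↔ Scond A.reverse y := by
        rw [hA, hr, mem_record_head, mem_runningMins_head]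
      have e3 := scond_iff_test A y
      have e4 := scond_iff_test A.reverse y
      have e5 : y ∈ A.reverse ↔ y ∈ A := List.mem_reverse
      have e6 := hksmem y
      simp only [List.mem_append, e1, e2, e3, e4, e5, e6, Bool.or_eq_true]
      tauto
    have hlen : (PySem.Set.ofList ((recordMins A a0 ++ [a0]) ++ (recordMins A.reverse (t.getLastD a0) ++ [t.getLastD a0]))).length =
        (ks.filter (fun v => Test A v || Test A.reverse v)).length := by
      apply length_eq_of_nodup_of_mem_iff
      · exact PySem.Set.nodup_ofList _
      · exact hksnodup.filter _
      · intro y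
        rw [PySem.Set.mem_ofList]
        exact hmemL y
    rw [hlen]
    omega
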